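-- pv_equiv track=rewrite | github.com/jradd/py-info | sorting/examples.py | max_perm
-- ===== SOURCE A (Python) =====
-- def max_perm(M):
--     """ Finding a Maximum Permutation """
--     n = len(M)                                        # How many elements?
--     A = set(range(n))                                 # A = {0, 1, ..., n-1}
--     count = [0] * n                                   # C[i] == 0 for i in A
--     for i in M:                                       # All that are "pointed to"
--         count[i] += 1                                 # Increment "point count"
--     O = [i for i in A if count[i] == 0]               # Useless elements
--     while O:                                          # While useless elmts left...
--          i = O.pop()                                  # Get one
--          A.remove(i)                                  # Remove it
--          j = M[i]                                     # Who's it pointing to?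
--          count[j] -= 1                                # Not anymore ...
--          if count[j] == 0:                            # Is j useless now?
--             O.append(j)                               # Then deal w/it next
--     return A                                          # Return useful elmts.
-- ===== SOURCE B (Python) =====
-- def max_perm(M):
--     """ Finding a Maximum Permutation (by cycle detection) """
--     n = len(M)
--     status = {i: 0 for i in range(n)}   # 0 unvisited, 1 on current path, 2 done off-cycle, 3 on a cycle
--     for s in range(n):
--         if status[s] != 0:
--             continue
--         path = []
--         j = s
--         while status[j] == 0:           # KeyError if M maps outside 0..n-1
--             status[j] = 1
--             path.append(j)
--             j = M[j]
--         if status[j] == 1:              # hit the current path: path[k:] is a new cycle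
--             k = path.index(j)
--             for v in path[:k]:
--                 status[v] = 2
--             for v in path[k:]:
--                 status[v] = 3
--         else:                           # ran into an already-finished region: no new cycle
--             for v in path:
--                 status[v] = 2
--     return {i for i in range(n) if status[i] == 3}
-- ===== Notes on version B (the rewrite author's own statement) =====
-- stated objective: alternative
-- what changed: B finds the surviving elements directly as the nodes on cycles of the functional graph, by path-following cycle detection with a per-node status map, instead of A's indegree counting and iterative peeling of useless elements with a worklist.
-- outside the precondition, e.g. on max_perm([-1]): A returns {0}, B raises KeyError
import Mathlib
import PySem

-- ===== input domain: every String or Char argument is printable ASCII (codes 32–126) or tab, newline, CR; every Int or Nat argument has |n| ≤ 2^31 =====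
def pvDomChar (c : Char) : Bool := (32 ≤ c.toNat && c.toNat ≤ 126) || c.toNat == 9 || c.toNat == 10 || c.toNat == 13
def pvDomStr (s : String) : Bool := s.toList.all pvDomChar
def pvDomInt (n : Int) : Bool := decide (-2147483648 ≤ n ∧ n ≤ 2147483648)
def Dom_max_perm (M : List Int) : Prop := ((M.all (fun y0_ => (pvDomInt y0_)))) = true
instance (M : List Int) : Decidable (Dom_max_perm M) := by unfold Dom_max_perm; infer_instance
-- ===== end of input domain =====

-- B replaces A's indegree-count peeling by direct cycle detection (path following with a
-- per-node status map); objective: alternative algorithm, same O(n) cost.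

-- ===== PORT A =====
-- the while-loop of A; fuel = |A| bounds the number of pops (each pop removes one element of A)
def maxPermLoop (M : List Int) : Nat → PySem.Set Int → List Int → List Int → PySem.Set Int
  | 0, A, _count, _O => A
  | fuel+1, A, count, O =>
    match PySem.List.pop? O with                -- while O: i = O.pop()
    | none => A                                 -- O empty: loop exits
    | some (i, O') =>
      let A' := (PySem.Set.remove? A i).getD A  -- A.remove(i); i ∈ A whenever the loop runs (invariant)
      let j := PySem.List.pyGetD M i 0          -- j = M[i]; index valid under Pre_
      let count' := PySem.List.pySetD count j (PySem.List.pyGetD count j 0 - 1)  -- count[j] -= 1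
      let O'' := if PySem.List.pyGetD count' j 0 == 0 then O' ++ [j] else O'     -- if count[j]==0: O.append(j)
      maxPermLoop M fuel A' count' O''

def max_perm (M : List Int) : List Int :=
  let n := M.length
  let A : PySem.Set Int := PySem.Set.ofList (PySem.List.pyRange 0 (n : Int) 1)   -- A = set(range(n))
  let count0 : List Int := List.replicate n 0                                    -- count = [0]*n
  let count := M.foldl (fun c i => PySem.List.pySetD c i (PySem.List.pyGetD c i 0 + 1)) count0  -- count[i] += 1
  let O := A.filter (fun i => PySem.List.pyGetD count i 0 == 0)                  -- O = [i for i in A if count[i]==0]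
  maxPermLoop M n A count O

-- ===== PORT B =====
-- the inner while-loop of B; fuel = n bounds its steps (each step turns one status 0 into 1)
def walkPath (M : List Int) : Nat → PySem.Dict Int Int → List Int → Int → PySem.Dict Int Int × List Int × Int
  | 0, st, path, j => (st, path, j)
  | fuel+1, st, path, j =>
    if st.getD j 0 == 0 then                    -- while status[j] == 0  (key present under Pre_)
      walkPath M fuel (st.insert j 1) (path ++ [j]) (PySem.List.pyGetD M j 0)
    else (st, path, j)

-- one iteration of B's outer loop: skip finished starts, else walk and mark the path
def processStart (M : List Int) (st : PySem.Dict Int Int) (s : Int) : PySem.Dict Int Int :=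
  if !(st.getD s 0 == 0) then st                -- if status[s] != 0: continue
  else
    let r := walkPath M M.length st [] s
    let st1 := r.1
    let path := r.2.1
    let j := r.2.2
    if st1.getD j 0 == 1 then                   -- hit the current path: path[k:] is a new cycle
      let k : Nat := (PySem.List.index? path j).getD 0   -- k = path.index(j); j ∈ path here
      let st2 := (PySem.List.slice path none (some (k : Int))).foldl (fun d v => d.insert v 2) st1
      (PySem.List.slice path (some (k : Int)) none).foldl (fun d v => d.insert v 3) st2
    else path.foldl (fun d v => d.insert v 2) st1

def max_perm_alt (M : List Int) : List Int :=
  let n := M.length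
  let st0 : PySem.Dict Int Int :=
    (PySem.List.pyRange 0 (n : Int) 1).foldl (fun d i => d.insert i 0) PySem.Dict.empty  -- {i: 0 for i in range(n)}
  let st := (PySem.List.pyRange 0 (n : Int) 1).foldl (processStart M) st0                -- for s in range(n): ...
  PySem.Set.ofList ((PySem.List.pyRange 0 (n : Int) 1).filter (fun i => st.getD i 0 == 3))  -- {i for i in range(n) if status[i]==3}

-- ===== PRECONDITION & SPEC =====
-- Pre_ excludes mappings with a value outside [0, n): for values outside [-n, n) A raises
-- IndexError at once, and for values in [-n, 0) A only ever returns through Python's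
-- negative-index wraparound (and raises KeyError in set.remove whenever such a negatively
-- labelled node must be discarded) — on those inputs B's dict-keyed status raises KeyError.
def Pre_max_perm (M : List Int) : Prop := ∀ v ∈ M, 0 ≤ v ∧ v < (M.length : Int)
instance (M : List Int) : Decidable (Pre_max_perm M) := by unfold Pre_max_perm; infer_instance
def pvWitness_max_perm : List Int := [1, 0, 0]

def Spec_max_perm (M : List Int) (out : List Int) : Prop := out = max_perm_alt M
instance (M : List Int) (out : List Int) : Decidable (Spec_max_perm M out) := by unfold Spec_max_perm; infer_instance

-- ===== CLAIM (what is proved, stated in full; the proofs are below) =====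
def Claim_equal_max_perm : Prop := ∀ (M : List Int), Dom_max_perm M → Pre_max_perm M → Spec_max_perm M (max_perm M)

-- ===== LEMMAS AND PROOFS =====


-- ---------- proof-side definitions ----------

-- the index map of the functional graph, as a Nat function
def pvF (M : List Int) (i : ℕ) : ℕ := (PySem.List.pyGetD M (i : Int) 0).toNat

-- i lies on a cycle
def pvPer (M : List Int) (i : ℕ) : Prop := ∃ k, 0 < k ∧ (pvF M)^[k] i = i

-- loop invariant of A's while loop
def InvA (M : List Int) (A : List Int) (count O : List Int) : Prop :=
  A.Sublist (PySem.List.pyRange 0 (M.length : Int) 1) ∧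
  count.length = M.length ∧
  (∀ j : ℕ, j < M.length →
    PySem.List.pyGetD count (j : Int) 0 = (A.countP (fun x => PySem.List.pyGetD M x 0 == (j : Int)) : Int)) ∧
  (∀ x, x ∈ O ↔ x ∈ A ∧ PySem.List.pyGetD count x 0 = 0) ∧
  O.Nodup ∧
  (∀ i : ℕ, i < M.length → pvPer M i → (i : Int) ∈ A) ∧
  (∀ j : ℕ, j < M.length → (j : Int) ∉ A → ∀ x ∈ A, PySem.List.pyGetD M x 0 ≠ (j : Int))

-- status value of node i in B's status dict
def pvVal (st : PySem.Dict Int Int) (i : ℕ) : Int := st.getD (i : Int) 0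

-- number of unvisited nodes (the inner-while fuel measure)
def pvZeros (n : ℕ) (st : PySem.Dict Int Int) : ℕ :=
  ((List.range n).filter (fun i => pvVal st i == 0)).length

-- invariant of B's outer loop after the starts below s have been processed
def OutInv (M : List Int) (st : PySem.Dict Int Int) (s : ℕ) : Prop :=
  (∀ i, i < M.length → pvVal st i = 0 ∨ pvVal st i = 2 ∨ pvVal st i = 3) ∧
  (∀ i, i < M.length → pvVal st i ≠ 0 → pvVal st (pvF M i) ≠ 0) ∧
  (∀ i, i < M.length → pvVal st i = 3 → pvPer M i) ∧
  (∀ i, i < M.length → pvVal st i = 2 → ¬ pvPer M i) ∧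
  (∀ i, i < M.length → i < s → pvVal st i ≠ 0)

-- invariant of B's inner walk (st0 = state at entry, s = start node)
def WalkInv (M : List Int) (st0 : PySem.Dict Int Int) (s : ℕ)
    (r : PySem.Dict Int Int × List Int × Int) : Prop :=
  (∀ i : ℕ, i < M.length →
      ((i : Int) ∈ r.2.1 → pvVal r.1 i = 1) ∧ ((i : Int) ∉ r.2.1 → pvVal r.1 i = pvVal st0 i)) ∧
  r.2.1.Nodup ∧
  (∀ m (h : m < r.2.1.length), r.2.1[m] = ((pvF M)^[m] s : Int)) ∧
  r.2.2 = ((pvF M)^[r.2.1.length] s : Int) ∧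
  (∀ x ∈ r.2.1, ∃ i : ℕ, i < M.length ∧ x = (i : Int) ∧ pvVal st0 i = 0)

-- ---------- generic lemmas ----------

theorem sublist_eq_of_mem_iff {α : Type} {l l1 l2 : List α}
    (h1 : l1.Sublist l) (h2 : l2.Sublist l) (hl : l.Nodup)
    (hm : ∀ x, x ∈ l1 ↔ x ∈ l2) : l1 = l2 := by
  induction l generalizing l1 l2 with
  | nil => rw [List.sublist_nil.mp h1, List.sublist_nil.mp h2]
  | cons a t ih =>
    have ha : a ∉ t := (List.nodup_cons.mp hl).1
    have ht : t.Nodup := (List.nodup_cons.mp hl).2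
    rcases List.sublist_cons_iff.mp h1 with h1' | ⟨r1, rfl, hr1⟩
    · rcases List.sublist_cons_iff.mp h2 with h2' | ⟨r2, rfl, hr2⟩
      · exact ih h1' h2' ht hm
      · exfalso
        exact ha (List.Sublist.mem ((hm a).mpr (List.mem_cons_self)) h1')
    · rcases List.sublist_cons_iff.mp h2 with h2' | ⟨r2, rfl, hr2⟩
      · exfalso
        exact ha (List.Sublist.mem ((hm a).mp (List.mem_cons_self)) h2')
      · have : r1 = r2 := by
          refine ih hr1 hr2 ht (fun x => ?_)
          constructor
          · intro hx
            have hxa : x ≠ a := by rintro rfl; exact ha (hr1.mem hx)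
            rcases List.mem_cons.mp ((hm x).mp (List.mem_cons_of_mem _ hx)) with h | h
            · exact absurd h hxa
            · exact h
          · intro hx
            have hxa : x ≠ a := by rintro rfl; exact ha (hr2.mem hx)
            rcases List.mem_cons.mp ((hm x).mpr (List.mem_cons_of_mem _ hx)) with h | h
            · exact absurd h hxa
            · exact h
        rw [this]

theorem pvF_lt (M : List Int) (hPre : Pre_max_perm M) :
    ∀ i, i < M.length → pvF M i < M.length := by
  intro i hi
  have h := PySem.List.pyGetD_eq_getElem M (i := (i : Int)) 0 (by positivity) (by exact_mod_cast hi)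
  have hmem : M[(i:Int).toNat] ∈ M := List.getElem_mem _
  have h2 := (hPre _ hmem).2
  have h1 := (hPre _ hmem).1
  simp only [pvF, h]
  omega

theorem pvF_cast (M : List Int) (hPre : Pre_max_perm M) :
    ∀ i, i < M.length → (pvF M i : Int) = PySem.List.pyGetD M (i : Int) 0 := by
  intro i hi
  have h := PySem.List.pyGetD_eq_getElem M (i := (i : Int)) 0 (by positivity) (by exact_mod_cast hi)
  have hmem : M[(i:Int).toNat] ∈ M := List.getElem_mem _
  have := (hPre _ hmem).1
  simp only [pvF, h]
  omega

theorem orbit_lt (M : List Int) (hPre : Pre_max_perm M) (s : ℕ) (hs : s < M.length) :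
    ∀ m, (pvF M)^[m] s < M.length := by
  intro m
  induction m with
  | zero => simpa using hs
  | succ m ih =>
    rw [Function.iterate_succ_apply']
    exact pvF_lt M hPre _ ih

theorem per_of_pred_closed (f : ℕ → ℕ) (T : Finset ℕ)
    (h : ∀ i ∈ T, ∃ p ∈ T, f p = i) : ∀ i ∈ T, ∃ k, 0 < k ∧ f^[k] i = i := by
  intro i hi
  classical
  -- choose a predecessor function
  let g : ℕ → ℕ := fun x => if hx : x ∈ T then (h x hx).choose else 0
  have hg : ∀ x ∈ T, g x ∈ T ∧ f (g x) = x := by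
    intro x hx
    simp only [g, dif_pos hx]
    exact ⟨(h x hx).choose_spec.1, (h x hx).choose_spec.2⟩
  have chain : ∀ m, g^[m] i ∈ T ∧ f^[m] (g^[m] i) = i := by
    intro m
    induction m with
    | zero => simpa using hi
    | succ m ih =>
      have h1 : g^[m+1] i = g (g^[m] i) := Function.iterate_succ_apply' g m i
      have h2 := hg _ ih.1
      constructor
      · rw [h1]; exact (hg _ ih.1).1
      · rw [h1, Function.iterate_succ_apply]
        rw [(hg _ ih.1).2]
        exact ih.2
  -- pigeonhole on m ↦ g^[m] i over range (T.card + 1)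
  have hcard : T.card < (Finset.range (T.card + 1)).card := by simp
  have hmaps : Set.MapsTo (fun m => g^[m] i) ↑(Finset.range (T.card + 1)) ↑T := by
    intro m _; exact (chain m).1
  obtain ⟨a, _, b, _, hab, heq⟩ := Finset.exists_ne_map_eq_of_card_lt_of_maps_to hcard hmaps
  rcases Nat.lt_or_ge a b with hlt | hge
  · refine ⟨b - a, by omega, ?_⟩
    have : f^[b] (g^[b] i) = i := (chain b).2
    rw [← heq] at this
    have h2 : f^[(b-a) + a] (g^[a] i) = i := by rw [show (b-a)+a = b by omega]; exact this
    rw [Function.iterate_add_apply] at h2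
    rw [(chain a).2] at h2
    exact h2
  · have hlt : b < a := by omega
    refine ⟨a - b, by omega, ?_⟩
    have : f^[a] (g^[a] i) = i := (chain a).2
    rw [heq] at this
    have h2 : f^[(a-b) + b] (g^[b] i) = i := by rw [show (a-b)+b = a by omega]; exact this
    rw [Function.iterate_add_apply] at h2
    rw [(chain b).2] at h2
    exact h2

-- ---------- A-side ----------

theorem discard_eq_erase (i : Int) : ∀ (A : List Int), A.Nodup →
    PySem.Set.discard A i = A.erase i := by
  intro A
  induction A with
  | nil => intro _; rfl
  | cons a t ih =>
    intro h
    rw [List.nodup_cons] at h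
    by_cases hai : a = i
    · subst hai
      rw [List.erase_cons_head]
      show List.filter (fun y => !y == a) (a :: t) = t
      rw [List.filter_cons]
      simp only [beq_self_eq_true, Bool.not_true, Bool.false_eq_true, if_false]
      apply List.filter_eq_self.mpr
      intro b hb
      rw [Bool.not_eq_true', beq_eq_false_iff_ne]
      intro hba
      exact h.1 (hba ▸ hb)
    · rw [List.erase_cons_tail (by simp [hai])]
      show List.filter (fun y => !y == i) (a :: t) = a :: t.erase i
      rw [List.filter_cons]
      rw [if_pos (by simp [hai])]
      congr 1
      exact ih h.2

theorem loopA (M : List Int) (hPre : Pre_max_perm M) :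
    ∀ fuel A count O, InvA M A count O → A.length ≤ fuel →
      (maxPermLoop M fuel A count O).Sublist (PySem.List.pyRange 0 (M.length : Int) 1) ∧
      (∀ i : ℕ, i < M.length → pvPer M i → (i : Int) ∈ maxPermLoop M fuel A count O) ∧
      (∀ x ∈ maxPermLoop M fuel A count O, ∃ p ∈ maxPermLoop M fuel A count O,
        PySem.List.pyGetD M p 0 = x) := by
  intro fuel
  induction fuel with
  | zero =>
    intro A count O hInv hfuel
    have hA : A = [] := List.eq_nil_of_length_eq_zero (Nat.le_zero.mp hfuel)
    subst hA
    simp only [maxPermLoop]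
    exact ⟨List.nil_sublist _, fun i hi hper => hInv.2.2.2.2.2.1 i hi hper,
      fun x hx => absurd hx List.not_mem_nil⟩
  | succ fuel ih =>
    intro A count O hInv hfuel
    obtain ⟨inv1, inv2, inv3, inv4, inv5, inv6, inv7⟩ := hInv
    have hAnd : A.Nodup := List.Sublist.nodup inv1 (PySem.List.nodup_pyRange_one _ _)
    rcases List.eq_nil_or_concat O with hO | ⟨O₀, i, rfl⟩
    · -- O is empty: the loop exits, A is the answer
      subst hO
      have hpop : PySem.List.pop? ([] : List Int) = none := rfl
      simp only [maxPermLoop, hpop]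
      refine ⟨inv1, fun i hi hper => inv6 i hi hper, ?_⟩
      intro x hx
      have hxO : ¬(x ∈ A ∧ PySem.List.pyGetD count x 0 = 0) := by
        rw [← inv4 x]
        exact List.not_mem_nil
      have hxc : PySem.List.pyGetD count x 0 ≠ 0 := fun h => hxO ⟨hx, h⟩
      have hxR := inv1.subset hx
      have hxb := PySem.List.mem_pyRange_one.mp hxR
      have hxn : x.toNat < M.length := by omega
      have hxcast : ((x.toNat : ℕ) : Int) = x := by omega
      have hcnt := inv3 x.toNat hxn
      rw [hxcast] at hcnt
      rw [hcnt] at hxc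
      have hcp : A.countP (fun y => PySem.List.pyGetD M y 0 == x) ≠ 0 := by
        exact_mod_cast hxc
      rw [Ne, List.countP_eq_zero] at hcp
      push Not at hcp
      obtain ⟨p, hpA, hp⟩ := hcp
      exact ⟨p, hpA, beq_iff_eq.mp (by simpa using hp)⟩
    · -- O = O₀ ++ [i]: pop i and peel it
      simp only [List.concat_eq_append] at inv4 inv5 ⊢
      have hpop : PySem.List.pop? (O₀ ++ [i]) = some (i, O₀) := PySem.List.pop?_last O₀ i
      simp only [maxPermLoop, hpop]
      have himem : i ∈ O₀ ++ [i] := by simp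
      obtain ⟨hiA, hic⟩ := (inv4 i).mp himem
      have hiR := inv1.subset hiA
      have hib := PySem.List.mem_pyRange_one.mp hiR
      have hin : i.toNat < M.length := by omega
      have hicast : ((i.toNat : ℕ) : Int) = i := by omega
      set jn := pvF M i.toNat with hjndef
      have hjn : jn < M.length := pvF_lt M hPre i.toNat hin
      have hjcast : ((jn : ℕ) : Int) = PySem.List.pyGetD M i 0 := by
        rw [← hicast]
        exact pvF_cast M hPre i.toNat hin
      have hrem : (PySem.Set.remove? A i).getD A = A.erase i := by
        rw [PySem.Set.remove?_of_mem hiA, Option.getD_some, discard_eq_erase i A hAnd]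
      -- count at i is zero: i has no predecessors left in A
      have hcpi : A.countP (fun y => PySem.List.pyGetD M y 0 == i) = 0 := by
        have h3 := inv3 i.toNat hin
        rw [hicast] at h3
        rw [hic] at h3
        exact_mod_cast h3.symm
      have hprednone : ∀ y ∈ A, PySem.List.pyGetD M y 0 ≠ i := by
        intro y hy
        have := List.countP_eq_zero.mp hcpi y hy
        simpa using this
      have hineqj : ((jn : ℕ) : Int) ≠ i := by
        intro h
        exact hprednone i hiA (by rw [← hjcast, h])
      have hjA : ((jn : ℕ) : Int) ∈ A := by
        by_contra hnot
        exact inv7 jn hjn hnot i hiA hjcast.symm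
      have hjA2 : ((jn : ℕ) : Int) ∈ A.erase i := hAnd.mem_erase_iff.mpr ⟨hineqj, hjA⟩
      have hpermA : A.Perm (i :: A.erase i) := List.perm_cons_erase hiA
      have hcountA : ∀ t : ℕ, t < M.length →
          A.countP (fun y => PySem.List.pyGetD M y 0 == (t : Int)) =
            (A.erase i).countP (fun y => PySem.List.pyGetD M y 0 == (t : Int)) +
              (if jn = t then 1 else 0) := by
        intro t ht
        rw [hpermA.countP_eq, List.countP_cons]
        congr 1
        rw [← hjcast]
        by_cases h : jn = t
        · rw [if_pos h, if_pos (by exact_mod_cast beq_iff_eq.mpr (congrArg _ h))]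
        · rw [if_neg h, if_neg]
          intro hh
          exact h (by exact_mod_cast beq_iff_eq.mp hh)
      have hgetset : ∀ (v : Int) (t : ℕ), t < M.length →
          PySem.List.pyGetD (PySem.List.pySetD count ((jn : ℕ) : Int) v) (t : Int) 0 =
            if jn = t then v else PySem.List.pyGetD count (t : Int) 0 := by
        intro v t ht
        rw [PySem.List.pySetD_natCast]
        have hlen : (count.set jn v).length = M.length := by rw [List.length_set]; exact inv2
        rw [PySem.List.pyGetD_eq_getElem _ 0 (by positivity) (by omega)]
        rw [PySem.List.pyGetD_eq_getElem _ 0 (by positivity) (by rw [inv2]; exact_mod_cast ht)]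
        rw [List.getElem_set]
        simp
      have hcountN : ∀ t : ℕ, t < M.length →
          PySem.List.pyGetD
            (PySem.List.pySetD count ((jn : ℕ) : Int)
              (PySem.List.pyGetD count ((jn : ℕ) : Int) 0 - 1)) (t : Int) 0 =
            ((A.erase i).countP (fun y => PySem.List.pyGetD M y 0 == (t : Int)) : Int) := by
        intro t ht
        rw [hgetset _ t ht]
        by_cases h : jn = t
        · rw [if_pos h]
          rw [inv3 jn hjn]
          rw [hcountA jn hjn, if_pos rfl]
          subst h
          push_cast
          ring
        · rw [if_neg h, inv3 t ht, hcountA t ht, if_neg h]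
          push_cast
          ring
      -- j is not in the old worklist
      have hjO : ((jn : ℕ) : Int) ∉ O₀ ++ [i] := by
        intro hmem
        obtain ⟨_, h0⟩ := (inv4 _).mp hmem
        rw [inv3 jn hjn] at h0
        have hz : A.countP (fun y => PySem.List.pyGetD M y 0 == ((jn : ℕ) : Int)) = 0 := by
          exact_mod_cast h0
        exact List.countP_eq_zero.mp hz i hiA (beq_iff_eq.mpr hjcast.symm)
      have hjO₀ : ((jn : ℕ) : Int) ∉ O₀ := fun h => hjO (List.mem_append.mpr (Or.inl h))
      have hndO := List.nodup_append.mp inv5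
      have hO₀nd : O₀.Nodup := hndO.1
      have hiO₀ : i ∉ O₀ := by
        intro h
        exact hndO.2.2 i h i (List.mem_singleton.mpr rfl) rfl
      have hO₀O : ∀ x, x ∈ O₀ ↔ (x ∈ O₀ ++ [i] ∧ x ≠ i) := by
        intro x
        constructor
        · intro hx
          exact ⟨List.mem_append.mpr (Or.inl hx), fun he => hiO₀ (he ▸ hx)⟩
        · rintro ⟨hx, hne⟩
          rcases List.mem_append.mp hx with h | h
          · exact h
          · exact absurd (List.mem_singleton.mp h) hne
      -- the count condition for x ∈ A.erase i, x ≠ ↑jn is unchanged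
      have hsame : ∀ x, x ∈ A → x ≠ ((jn : ℕ) : Int) →
          (PySem.List.pyGetD
              (PySem.List.pySetD count ((jn : ℕ) : Int)
                (PySem.List.pyGetD count ((jn : ℕ) : Int) 0 - 1)) x 0 = 0 ↔
            PySem.List.pyGetD count x 0 = 0) := by
        intro x hxA hxne
        have hxb := PySem.List.mem_pyRange_one.mp (inv1.subset hxA)
        have hxn : x.toNat < M.length := by omega
        have hxcast : ((x.toNat : ℕ) : Int) = x := by omega
        rw [← hxcast]
        rw [hgetset _ x.toNat hxn, if_neg (fun h => hxne (by rw [← hxcast, ← h]))]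
      -- new invariant and fuel bound, then apply the induction hypothesis
      rw [hrem, ← hjcast]
      refine ih _ _ _ ⟨?_, ?_, ?_, ?_, ?_, ?_, ?_⟩ ?_
      · exact (List.erase_sublist).trans inv1
      · rw [PySem.List.length_pySetD]; exact inv2
      · exact hcountN
      · -- worklist membership characterization
        intro x
        by_cases hC : (PySem.List.pyGetD
            (PySem.List.pySetD count ((jn : ℕ) : Int)
              (PySem.List.pyGetD count ((jn : ℕ) : Int) 0 - 1)) ((jn : ℕ) : Int) 0 == 0) = true
        · rw [if_pos hC]
          by_cases hxj : x = ((jn : ℕ) : Int)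
          · subst hxj
            refine iff_of_true (List.mem_append.mpr (Or.inr (List.mem_singleton.mpr rfl))) ?_
            exact ⟨hjA2, beq_iff_eq.mp hC⟩
          · rw [show (x ∈ O₀ ++ [((jn : ℕ) : Int)]) ↔ x ∈ O₀ from
              ⟨fun h => by
                rcases List.mem_append.mp h with h | h
                · exact h
                · exact absurd (List.mem_singleton.mp h) hxj,
               fun h => List.mem_append.mpr (Or.inl h)⟩]
            rw [hO₀O x, inv4 x]
            constructor
            · rintro ⟨⟨hxA, hx0⟩, hne⟩
              refine ⟨hAnd.mem_erase_iff.mpr ⟨hne, hxA⟩, ?_⟩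
              rw [hsame x hxA hxj]
              exact hx0
            · rintro ⟨hxA2, hx0⟩
              obtain ⟨hne, hxA⟩ := hAnd.mem_erase_iff.mp hxA2
              rw [hsame x hxA hxj] at hx0
              exact ⟨⟨hxA, hx0⟩, hne⟩
        · rw [if_neg hC]
          by_cases hxj : x = ((jn : ℕ) : Int)
          · subst hxj
            refine iff_of_false hjO₀ ?_
            rintro ⟨_, h0⟩
            exact hC (beq_iff_eq.mpr h0)
          · rw [hO₀O x, inv4 x]
            constructor
            · rintro ⟨⟨hxA, hx0⟩, hne⟩
              refine ⟨hAnd.mem_erase_iff.mpr ⟨hne, hxA⟩, ?_⟩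
              rw [hsame x hxA hxj]
              exact hx0
            · rintro ⟨hxA2, hx0⟩
              obtain ⟨hne, hxA⟩ := hAnd.mem_erase_iff.mp hxA2
              rw [hsame x hxA hxj] at hx0
              exact ⟨⟨hxA, hx0⟩, hne⟩
      · -- the worklist stays duplicate-free
        by_cases hC : (PySem.List.pyGetD
            (PySem.List.pySetD count ((jn : ℕ) : Int)
              (PySem.List.pyGetD count ((jn : ℕ) : Int) 0 - 1)) ((jn : ℕ) : Int) 0 == 0) = true
        · rw [if_pos hC]
          rw [List.nodup_append]
          refine ⟨hO₀nd, List.nodup_singleton _, ?_⟩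
          intro a ha b hb
          rw [List.mem_singleton] at hb
          subst hb
          exact fun h => hjO₀ (h ▸ ha)
        · rw [if_neg hC]
          exact hO₀nd
      · -- nodes on cycles are never popped
        intro p hp hper
        obtain ⟨k, hk, hfix⟩ := hper
        have hq_lt : (pvF M)^[k - 1] p < M.length := orbit_lt M hPre p hp (k - 1)
        have hfq : pvF M ((pvF M)^[k - 1] p) = p := by
          have : pvF M ((pvF M)^[k - 1] p) = (pvF M)^[k] p := by
            conv_rhs => rw [show k = (k - 1) + 1 by omega]
            exact (Function.iterate_succ_apply' (pvF M) (k - 1) p).symm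
          rw [this, hfix]
        have hqper : pvPer M ((pvF M)^[k - 1] p) := by
          refine ⟨k, hk, ?_⟩
          calc (pvF M)^[k] ((pvF M)^[k - 1] p)
              = (pvF M)^[k - 1] ((pvF M)^[k] p) := by
                rw [← Function.iterate_add_apply, ← Function.iterate_add_apply, Nat.add_comm]
            _ = (pvF M)^[k - 1] p := by rw [hfix]
        have hqA : (((pvF M)^[k - 1] p : ℕ) : Int) ∈ A := inv6 _ hq_lt hqper
        have hpA : ((p : ℕ) : Int) ∈ A := inv6 p hp ⟨k, hk, hfix⟩
        have hpne : ((p : ℕ) : Int) ≠ i := by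
          intro he
          apply hprednone _ hqA
          rw [← pvF_cast M hPre _ hq_lt, hfq, he]
        exact hAnd.mem_erase_iff.mpr ⟨hpne, hpA⟩
      · -- predecessors of removed nodes are removed
        intro t ht hnotin x hxA2
        have hxA : x ∈ A := (hAnd.mem_erase_iff.mp hxA2).2
        by_cases hti : ((t : ℕ) : Int) = i
        · intro heq
          exact hprednone x hxA (by rw [heq, hti])
        · have htA : ((t : ℕ) : Int) ∉ A := by
            intro hmem
            exact hnotin (hAnd.mem_erase_iff.mpr ⟨hti, hmem⟩)
          exact inv7 t ht htA x hxA
      · -- the fuel bound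
        rw [List.length_erase_of_mem hiA]
        have : 0 < A.length := List.length_pos_of_mem hiA
        omega


theorem A_char (M : List Int) (hPre : Pre_max_perm M) :
    (max_perm M).Sublist (PySem.List.pyRange 0 (M.length : Int) 1) ∧
    (∀ x, x ∈ max_perm M ↔ ∃ i : ℕ, i < M.length ∧ x = (i : Int) ∧ pvPer M i) := by
  classical
  set R := PySem.List.pyRange 0 (M.length : Int) 1 with hRdef
  have hRnd : R.Nodup := PySem.List.nodup_pyRange_one 0 (M.length : Int)
  have hA0 : PySem.Set.ofList R = R := PySem.Set.ofList_eq_self_of_nodup R hRnd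
  -- the first loop of A computes the indegree table
  have foldinc : ∀ (l : List Int), (∀ v ∈ l, 0 ≤ v ∧ v < (M.length : Int)) →
      ∀ (c : List Int), c.length = M.length →
        (l.foldl (fun c i => PySem.List.pySetD c i (PySem.List.pyGetD c i 0 + 1)) c).length
            = M.length ∧
        ∀ j : ℕ, j < M.length →
          PySem.List.pyGetD
              (l.foldl (fun c i => PySem.List.pySetD c i (PySem.List.pyGetD c i 0 + 1)) c)
              (j : Int) 0 =
            PySem.List.pyGetD c (j : Int) 0 + (l.count (j : Int) : Int) := by
    intro l
    induction l with
    | nil => intro _ c hc; exact ⟨hc, fun j hj => by simp⟩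
    | cons v l ihl =>
      intro hl c hc
      have hv := hl v List.mem_cons_self
      set c' := PySem.List.pySetD c v (PySem.List.pyGetD c v 0 + 1) with hc'
      have hc'len : c'.length = M.length := by rw [hc', PySem.List.length_pySetD]; exact hc
      have hrest := ihl (fun w hw => hl w (List.mem_cons_of_mem _ hw)) c' hc'len
      refine ⟨hrest.1, ?_⟩
      intro j hj
      rw [List.foldl_cons, hrest.2 j hj]
      have hvcast : ((v.toNat : ℕ) : Int) = v := by omega
      have hstep : PySem.List.pyGetD c' (j : Int) 0
          = PySem.List.pyGetD c (j : Int) 0 + (if v = (j : Int) then 1 else 0) := by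
        rw [hc', ← hvcast, PySem.List.pySetD_natCast]
        by_cases hvj : v.toNat = j
        · subst hvj
          rw [PySem.List.pyGetD_eq_getElem _ 0 (by positivity)
            (by rw [List.length_set]; exact_mod_cast (hc ▸ hj))]
          rw [List.getElem_set, if_pos (by omega)]
          simp
        · rw [if_neg (fun h => hvj (by exact_mod_cast h))]
          rw [PySem.List.pyGetD_eq_getElem _ (i := (j : Int)) 0 (by positivity)
            (by rw [List.length_set]; exact_mod_cast (hc ▸ hj))]
          rw [List.getElem_set, if_neg (by omega)]
          rw [PySem.List.pyGetD_eq_getElem c (i := (j : Int)) 0 (by positivity)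
            (by exact_mod_cast (hc ▸ hj))]
          simp
      rw [hstep, List.count_cons]
      push_cast
      by_cases h : v = (j : Int)
      · rw [if_pos h, if_pos (beq_iff_eq.mpr h)]
        ring
      · rw [if_neg h, if_neg (by simpa using h)]
        ring
  have hrepl : ∀ j : ℕ, j < M.length →
      PySem.List.pyGetD (List.replicate M.length (0 : Int)) (j : Int) 0 = 0 := by
    intro j hj
    rw [PySem.List.pyGetD_eq_getElem _ 0 (by positivity)
      (by rw [List.length_replicate]; exact_mod_cast hj)]
    simp
  have hfold := foldinc M hPre (List.replicate M.length (0 : Int)) (List.length_replicate)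
  -- the indegree of j equals the number of indices mapping to j
  have hRmap : R.map (fun x => PySem.List.pyGetD M x 0) = M := by
    have := PySem.List.map_pyGetD_pyRange_zero M 0
    simpa using this
  have hcntP : ∀ t : Int, R.countP (fun x => PySem.List.pyGetD M x 0 == t) = M.count t := by
    intro t
    have h1 : R.countP (fun x => PySem.List.pyGetD M x 0 == t)
        = (R.map (fun x => PySem.List.pyGetD M x 0)).countP (fun y => y == t) := by
      rw [List.countP_map]
      rfl
    rw [h1, hRmap, List.count_eq_countP]
  have hOdef : ∀ x, x ∈ R.filter (fun y => PySem.List.pyGetD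
      (M.foldl (fun c i => PySem.List.pySetD c i (PySem.List.pyGetD c i 0 + 1))
        (List.replicate M.length (0 : Int))) y 0 == 0) ↔
      x ∈ R ∧ PySem.List.pyGetD
        (M.foldl (fun c i => PySem.List.pySetD c i (PySem.List.pyGetD c i 0 + 1))
          (List.replicate M.length (0 : Int))) x 0 = 0 := by
    intro x
    rw [List.mem_filter]
    constructor
    · rintro ⟨h1, h2⟩; exact ⟨h1, beq_iff_eq.mp h2⟩
    · rintro ⟨h1, h2⟩; exact ⟨h1, beq_iff_eq.mpr h2⟩
  have hInvInit : InvA M R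
      (M.foldl (fun c i => PySem.List.pySetD c i (PySem.List.pyGetD c i 0 + 1))
        (List.replicate M.length (0 : Int)))
      (R.filter (fun y => PySem.List.pyGetD
        (M.foldl (fun c i => PySem.List.pySetD c i (PySem.List.pyGetD c i 0 + 1))
          (List.replicate M.length (0 : Int))) y 0 == 0)) := by
    refine ⟨List.Sublist.refl R, hfold.1, ?_, hOdef, List.Nodup.filter _ hRnd, ?_, ?_⟩
    · intro j hj
      rw [hfold.2 j hj, hrepl j hj, hcntP ((j : ℕ) : Int)]
      ring
    · intro i hi _
      rw [hRdef]
      exact PySem.List.mem_pyRange_one.mpr ⟨by positivity, by exact_mod_cast hi⟩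
    · intro j hj hnot
      exfalso
      exact hnot (by
        rw [hRdef]
        exact PySem.List.mem_pyRange_one.mpr ⟨by positivity, by exact_mod_cast hj⟩)
  have hRlen : R.length = M.length := by
    rw [hRdef, PySem.List.length_pyRange_one]
    omega
  obtain ⟨hsub, hperm, hpred⟩ :=
    loopA M hPre M.length R _ _ hInvInit (le_of_eq hRlen)
  have hrw : max_perm M = maxPermLoop M M.length R
      (M.foldl (fun c i => PySem.List.pySetD c i (PySem.List.pyGetD c i 0 + 1))
        (List.replicate M.length (0 : Int)))
      (R.filter (fun y => PySem.List.pyGetD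
        (M.foldl (fun c i => PySem.List.pySetD c i (PySem.List.pyGetD c i 0 + 1))
          (List.replicate M.length (0 : Int))) y 0 == 0)) := by
    show maxPermLoop M M.length (PySem.Set.ofList R) _
        ((PySem.Set.ofList R).filter _) = _
    rw [hA0]
  rw [hrw]
  refine ⟨hsub, ?_⟩
  -- at termination every survivor has a surviving predecessor: all survivors are on cycles
  have hallper : ∀ x ∈ maxPermLoop M M.length R
      (M.foldl (fun c i => PySem.List.pySetD c i (PySem.List.pyGetD c i 0 + 1))
        (List.replicate M.length (0 : Int)))
      (R.filter (fun y => PySem.List.pyGetD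
        (M.foldl (fun c i => PySem.List.pySetD c i (PySem.List.pyGetD c i 0 + 1))
          (List.replicate M.length (0 : Int))) y 0 == 0)), pvPer M x.toNat := by
    set r := maxPermLoop M M.length R
      (M.foldl (fun c i => PySem.List.pySetD c i (PySem.List.pyGetD c i 0 + 1))
        (List.replicate M.length (0 : Int)))
      (R.filter (fun y => PySem.List.pyGetD
        (M.foldl (fun c i => PySem.List.pySetD c i (PySem.List.pyGetD c i 0 + 1))
          (List.replicate M.length (0 : Int))) y 0 == 0)) with hr
    set T : Finset ℕ := (r.map Int.toNat).toFinset with hT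
    have hTc : ∀ y ∈ T, ∃ p ∈ T, pvF M p = y := by
      intro y hy
      rw [hT, List.mem_toFinset, List.mem_map] at hy
      obtain ⟨x, hxr, hxy⟩ := hy
      obtain ⟨p, hpr, hpx⟩ := hpred x hxr
      have hpb := PySem.List.mem_pyRange_one.mp (hsub.subset hpr)
      refine ⟨p.toNat, ?_, ?_⟩
      · rw [hT, List.mem_toFinset, List.mem_map]
        exact ⟨p, hpr, rfl⟩
      · unfold pvF
        rw [show ((p.toNat : ℕ) : Int) = p by omega, hpx, hxy]
    intro x hxr
    exact per_of_pred_closed (pvF M) T hTc x.toNat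
      (by rw [hT, List.mem_toFinset, List.mem_map]; exact ⟨x, hxr, rfl⟩)
  intro x
  constructor
  · intro hx
    have hxb := PySem.List.mem_pyRange_one.mp (hsub.subset hx)
    exact ⟨x.toNat, by omega, by omega, hallper x hx⟩
  · rintro ⟨i, hi, rfl, hper⟩
    exact hperm i hi hper

-- ---------- B-side ----------

theorem markVal (v : Int) : ∀ (l : List Int) (st : PySem.Dict Int Int) (i : ℕ),
    pvVal (l.foldl (fun d y => d.insert y v) st) i =
      if (i : Int) ∈ l then v else pvVal st i := by
  intro l
  induction l with
  | nil => simp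
  | cons y l ih =>
    intro st i
    simp only [List.foldl_cons, ih, List.mem_cons]
    by_cases h1 : (i : Int) ∈ l
    · simp [h1]
    · by_cases h2 : (i : Int) = y
      · simp [h2, pvVal]
      · simp [h1, h2, pvVal, PySem.Dict.getD_insert]

theorem zeros_all_pos (n : ℕ) (st : PySem.Dict Int Int) (hz : pvZeros n st = 0) :
    ∀ i, i < n → pvVal st i ≠ 0 := by
  intro i hi
  have h : (List.range n).filter (fun i => pvVal st i == 0) = [] :=
    List.eq_nil_of_length_eq_zero hz
  have := List.filter_eq_nil_iff.mp h i (List.mem_range.mpr hi)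
  simpa using this

theorem zeros_insert_lt (n : ℕ) (st : PySem.Dict Int Int) (jn : ℕ) (hjn : jn < n)
    (h0 : pvVal st jn = 0) :
    pvZeros n (st.insert (jn : Int) 1) < pvZeros n st := by
  unfold pvZeros
  rw [← List.countP_eq_length_filter, ← List.countP_eq_length_filter]
  have hperm := List.perm_cons_erase (List.mem_range.mpr hjn)
  rw [hperm.countP_eq, hperm.countP_eq]
  simp only [List.countP_cons]
  have hnotmem : jn ∉ (List.range n).erase jn := fun h =>
    (((List.nodup_range).mem_erase_iff.mp h).1) rfl
  have hcongr : ((List.range n).erase jn).countP (fun i => pvVal (st.insert (jn : Int) 1) i == 0)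
      = ((List.range n).erase jn).countP (fun i => pvVal st i == 0) := by
    apply List.countP_congr
    intro x hx
    have hxne : x ≠ jn := by
      intro h; exact hnotmem (h ▸ hx)
    have : pvVal (st.insert (jn : Int) 1) x = pvVal st x := by
      unfold pvVal
      rw [PySem.Dict.getD_insert]
      rw [if_neg (by exact_mod_cast hxne)]
    simp [this]
  rw [hcongr]
  have h1 : pvVal (st.insert (jn : Int) 1) jn = 1 := by
    unfold pvVal; rw [PySem.Dict.getD_insert, if_pos rfl]
  simp [h0, h1]

theorem walk_spec (M : List Int) (hPre : Pre_max_perm M) (st0 : PySem.Dict Int Int)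
    (s : ℕ) (hs : s < M.length) :
    ∀ fuel st path j, WalkInv M st0 s (st, path, j) → pvZeros M.length st ≤ fuel →
      WalkInv M st0 s (walkPath M fuel st path j) ∧
      pvVal (walkPath M fuel st path j).1 ((walkPath M fuel st path j).2.2).toNat ≠ 0 := by
  intro fuel
  induction fuel with
  | zero =>
    intro st path j hInv hz
    refine ⟨hInv, ?_⟩
    have hj := hInv.2.2.2.1
    dsimp only at hj
    have hjn : (pvF M)^[path.length] s < M.length := orbit_lt M hPre s hs _
    simp only [walkPath] at *
    rw [hj]
    simpa using zeros_all_pos M.length st (Nat.le_zero.mp hz) _ hjn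
  | succ fuel ih =>
    intro st path j hInv hz
    obtain ⟨hval, hnd, helem, hj, hentries⟩ := hInv
    dsimp only at hval hnd helem hj hentries
    have hjn : (pvF M)^[path.length] s < M.length := orbit_lt M hPre s hs _
    by_cases hc : st.getD j 0 == 0
    · -- loop body runs
      have hceq : pvVal st ((pvF M)^[path.length] s) = 0 := by
        unfold pvVal; rw [← hj]; exact beq_iff_eq.mp hc
      have hjmem : j ∉ path := by
        intro hmem
        have := (hval _ hjn).1 (by rw [← hj]; exact hmem)
        rw [hceq] at this
        exact one_ne_zero this.symm
      have hst0 : pvVal st0 ((pvF M)^[path.length] s) = 0 := by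
        rw [← (hval _ hjn).2 (by rw [← hj]; exact hjmem)]
        exact hceq
      have hInv' : WalkInv M st0 s (st.insert j 1, path ++ [j], PySem.List.pyGetD M j 0) := by
        refine ⟨?_, ?_, ?_, ?_, ?_⟩
        · intro i hi
          constructor
          · intro hmem
            rcases List.mem_append.mp hmem with h | h
            · have h1 := (hval i hi).1 h
              unfold pvVal at *
              rw [PySem.Dict.getD_insert]
              split_ifs with he
              · rfl
              · exact h1
            · have : (i : Int) = j := List.mem_singleton.mp h
              unfold pvVal
              rw [PySem.Dict.getD_insert, if_pos this]
          · intro hmem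
            have h1 : (i : Int) ∉ path := fun h => hmem (List.mem_append.mpr (Or.inl h))
            have h2 : (i : Int) ≠ j := fun h => hmem (List.mem_append.mpr (Or.inr (by simp [h])))
            unfold pvVal
            rw [PySem.Dict.getD_insert, if_neg h2]
            exact (hval i hi).2 h1
        · rw [List.nodup_append]
          refine ⟨hnd, List.nodup_singleton _, ?_⟩
          intro a ha b hb
          rw [List.mem_singleton] at hb
          subst hb
          exact fun h => hjmem (h ▸ ha)
        · intro m hm
          simp only [List.length_append, List.length_singleton] at hm
          by_cases hmL : m < path.length
          · rw [List.getElem_append_left hmL]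
            exact helem m hmL
          · have hmeq : m = path.length := by omega
            subst hmeq
            rw [List.getElem_append_right (le_refl _)]
            simpa using hj
        · have hlen : (path ++ [j]).length = path.length + 1 := by simp
          rw [hlen, Function.iterate_succ_apply']
          rw [pvF_cast M hPre _ hjn, hj]
        · intro x hx
          rcases List.mem_append.mp hx with h | h
          · exact hentries x h
          · have : x = j := List.mem_singleton.mp h
            subst this
            exact ⟨_, hjn, hj, hst0⟩
      have hz' : pvZeros M.length (st.insert j 1) ≤ fuel := by
        have := zeros_insert_lt M.length st _ hjn hceq
        rw [← hj] at this
        omega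
      have hres := ih (st.insert j 1) (path ++ [j]) (PySem.List.pyGetD M j 0) hInv' hz'
      have hunfold : walkPath M (fuel + 1) st path j
          = walkPath M fuel (st.insert j 1) (path ++ [j]) (PySem.List.pyGetD M j 0) := by
        simp only [walkPath, hc, if_true]
      rw [hunfold]
      exact hres
    · have hunfold : walkPath M (fuel + 1) st path j = (st, path, j) := by
        simp only [walkPath, hc]
        simp only [Bool.false_eq_true, if_false]
      rw [hunfold]
      refine ⟨⟨hval, hnd, helem, hj, hentries⟩, ?_⟩
      have : st.getD j 0 ≠ 0 := by simpa using hc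
      rw [hj] at this ⊢
      simpa [pvVal] using this

theorem process_spec (M : List Int) (hPre : Pre_max_perm M) (st : PySem.Dict Int Int)
    (s : ℕ) (hs : s < M.length) (hInv : OutInv M st s) :
    OutInv M (processStart M st (s : Int)) (s + 1) := by
  obtain ⟨inv1, inv2, inv3, inv4, inv5⟩ := hInv
  by_cases hs0 : pvVal st s = 0
  case neg =>
    -- status[s] != 0: continue
    have hcond : (!(st.getD (s : Int) 0 == 0)) = true := by
      simpa [pvVal] using hs0
    have hrun : processStart M st (s : Int) = st := by
      unfold processStart
      rw [if_pos hcond]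
    rw [hrun]
    refine ⟨inv1, inv2, inv3, inv4, ?_⟩
    intro i hi his
    rcases Nat.lt_or_ge i s with h | h
    · exact inv5 i hi h
    · have : i = s := by omega
      subst this
      exact hs0
  case pos =>
    have hcond : (!(st.getD (s : Int) 0 == 0)) = false := by
      simpa [pvVal] using hs0
    -- the walk
    set w := walkPath M M.length st [] (s : Int) with hw
    have hInv0 : WalkInv M st s (st, [], (s : Int)) := by
      refine ⟨?_, List.nodup_nil, ?_, ?_, ?_⟩
      · intro i hi
        exact ⟨fun h => absurd h (List.not_mem_nil), fun _ => rfl⟩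
      · intro m hm; simp at hm
      · simp
      · intro x hx; exact absurd hx List.not_mem_nil
    have hzn : pvZeros M.length st ≤ M.length := by
      unfold pvZeros
      calc ((List.range M.length).filter _).length ≤ (List.range M.length).length :=
            List.length_filter_le _ _
        _ = M.length := List.length_range
    obtain ⟨⟨hval, hnd, helem, hjr, hentries⟩, hstop⟩ :=
      walk_spec M hPre st s hs M.length st [] (s : Int) hInv0 hzn
    rw [← hw] at hval hnd helem hjr hentries hstop
    set st1 := w.1 with hst1
    set path := w.2.1 with hpath
    set jr := w.2.2 with hjrdef
    set L := path.length with hL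
    set g : ℕ → ℕ := fun m => (pvF M)^[m] s with hg
    have hjn : g L < M.length := orbit_lt M hPre s hs L
    have hstop' : pvVal st1 (g L) ≠ 0 := by
      rw [hjr] at hstop
      simpa using hstop
    have hLpos : 0 < L := by
      by_contra h
      have hL0 : L = 0 := by omega
      have hpnil : path = [] := List.eq_nil_of_length_eq_zero hL0
      have : pvVal st1 (g 0) = pvVal st (g 0) := by
        refine (hval _ (by simpa [hg] using hs)).2 ?_
        rw [hpnil]; exact List.not_mem_nil
      rw [hL0] at hstop'
      apply hstop'
      rw [this]
      simpa [hg] using hs0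
    have hgm_lt : ∀ m, g m < M.length := orbit_lt M hPre s hs
    have helem' : ∀ m (h : m < L), path[m] = ((g m : ℕ) : Int) := helem
    have ginj : ∀ m1 m2, m1 < L → m2 < L → g m1 = g m2 → m1 = m2 := by
      intro m1 m2 h1 h2 hgeq
      have he : path[m1] = path[m2] := by
        rw [helem' _ h1, helem' _ h2]
        exact_mod_cast hgeq
      exact (List.Nodup.getElem_inj_iff hnd).mp he
    have hmem_path : ∀ x, x ∈ path ↔ ∃ m, m < L ∧ x = ((g m : ℕ) : Int) := by
      intro x
      constructor
      · intro hx
        obtain ⟨m, hm, hx'⟩ := List.mem_iff_getElem.mp hx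
        exact ⟨m, hm, by rw [← hx', helem' m hm]⟩
      · rintro ⟨m, hm, rfl⟩
        rw [← helem' m hm]
        exact List.getElem_mem _
    have hpath0 : ∀ m, m < L → pvVal st (g m) = 0 := by
      intro m hm
      obtain ⟨i, hi, hcast, h0⟩ := hentries path[m] (List.getElem_mem _)
      rw [helem' m hm] at hcast
      have : g m = i := by exact_mod_cast hcast
      rw [this]; exact h0
    have hsmem : (s : Int) ∈ path := by
      have : path[0] = ((g 0 : ℕ) : Int) := helem' 0 hLpos
      rw [hmem_path]
      exact ⟨0, hLpos, by simp [hg]⟩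
    -- case split on what the walk hit
    by_cases hb : st1.getD jr 0 == 1
    · -- new cycle: path[k:] are cycle nodes
      have hjrpath : jr ∈ path := by
        by_contra hnm
        have hvv := (hval _ hjn).2 (by rw [hjr] at hnm; exact hnm)
        rw [hjr] at hb
        have h1 : pvVal st1 (g L) = 1 := by simpa [pvVal] using hb
        rw [h1] at hvv
        rcases inv1 _ hjn with h | h | h <;> rw [← hvv] at h <;> omega
      obtain ⟨k, hkidx⟩ := Option.isSome_iff_exists.mp
        ((PySem.List.index?_isSome_iff path jr).mpr hjrpath)
      obtain ⟨hkL, hpathk, hkfirst⟩ := PySem.List.getElem_of_index?_eq_some hkidx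
      have hgk : g k = g L := by
        have := hpathk
        rw [helem' k hkL, hjr] at this
        exact_mod_cast this
      set c := L - k with hc
      have hcpos : 0 < c := by omega
      have shift' : ∀ m, k ≤ m → g (m + c) = g m := by
        intro m hkm
        have h1 : m + c = (m - k) + L := by omega
        have key : (pvF M)^[m + c] s = (pvF M)^[m] s := by
          rw [h1, Function.iterate_add_apply]
          conv_rhs => rw [show m = (m - k) + k by omega, Function.iterate_add_apply]
          rw [show (pvF M)^[L] s = (pvF M)^[k] s from hgk.symm]
        exact key
      have reduce : ∀ t, k ≤ t → ∃ t', k ≤ t' ∧ t' < L ∧ g t = g t' := by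
        intro t
        induction t using Nat.strong_induction_on with
        | _ t ih =>
          intro ht
          by_cases hL' : t < L
          · exact ⟨t, ht, hL', rfl⟩
          · have h1 : k ≤ t - c := by omega
            have h3 : g t = g (t - c) := by
              have := shift' (t - c) h1
              rw [show t - c + c = t by omega] at this
              exact this
            obtain ⟨t', ht1, ht2, ht3⟩ := ih (t - c) (by omega) h1
            exact ⟨t', ht1, ht2, by rw [h3, ht3]⟩
      -- the result of processStart in this case
      have hrun : processStart M st (s : Int) =
          (path.drop k).foldl (fun d v => d.insert v 3)
            ((path.take k).foldl (fun d v => d.insert v 2) st1) := by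
        unfold processStart
        rw [if_neg (by rw [hcond]; exact Bool.false_ne_true)]
        rw [← hw]
        dsimp only
        rw [← hst1, ← hjrdef, ← hpath]
        simp only [hb, if_true, hkidx, Option.getD_some]
        rw [PySem.List.slice_to_natCast, PySem.List.slice_from_natCast]
      -- value of the final status map
      have valfinal : ∀ i : ℕ, i < M.length →
          pvVal (processStart M st (s : Int)) i =
            if (i : Int) ∈ path.drop k then 3
            else if (i : Int) ∈ path.take k then 2
            else pvVal st i := by
        intro i hi
        rw [hrun, markVal]
        split_ifs with h1 h2
        · rfl
        · rw [markVal, if_pos h2]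
        · rw [markVal, if_neg h2]
          apply (hval i hi).2
          intro hp
          rw [← List.take_append_drop k path] at hp
          rcases List.mem_append.mp hp with h | h
          · exact h2 h
          · exact h1 h
      have hnotpath : ∀ x : ℕ, (x : Int) ∉ path →
          (x : Int) ∉ path.drop k ∧ (x : Int) ∉ path.take k := fun x hx =>
        ⟨fun h => hx (List.mem_of_mem_drop h), fun h => hx (List.mem_of_mem_take h)⟩
      have mem_drop : ∀ x : Int, x ∈ path.drop k ↔ ∃ m, k ≤ m ∧ m < L ∧ x = ((g m : ℕ) : Int) := by
        intro x
        constructor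
        · intro hx
          obtain ⟨m, hm, hx'⟩ := List.mem_iff_getElem.mp hx
          have hlen : (path.drop k).length = L - k := by rw [List.length_drop]
          rw [List.getElem_drop] at hx'
          have hkm : k + m < L := by omega
          exact ⟨k + m, by omega, hkm, by rw [← hx', helem' _ hkm]⟩
        · rintro ⟨m, hkm, hmL, rfl⟩
          have hml : m - k < (path.drop k).length := by rw [List.length_drop]; omega
          refine List.mem_iff_getElem.mpr ⟨m - k, hml, ?_⟩
          rw [List.getElem_drop, helem' _ (show k + (m - k) < L by omega)]
          congr 2
          omega
      have mem_take : ∀ x : Int, x ∈ path.take k ↔ ∃ m, m < k ∧ x = ((g m : ℕ) : Int) := by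
        intro x
        constructor
        · intro hx
          obtain ⟨m, hm, hx'⟩ := List.mem_iff_getElem.mp hx
          have hlen : (path.take k).length = k := by rw [List.length_take]; omega
          rw [List.getElem_take] at hx'
          have hmk : m < k := by omega
          exact ⟨m, hmk, by rw [← hx', helem' _ (by omega)]⟩
        · rintro ⟨m, hmk, rfl⟩
          have hml : m < (path.take k).length := by rw [List.length_take]; omega
          refine List.mem_iff_getElem.mpr ⟨m, hml, ?_⟩
          rw [List.getElem_take, helem' _ (by omega)]
      have hnz : ∀ x : ℕ, x < M.length → (x : Int) ∈ path →
          pvVal (processStart M st (s : Int)) x ≠ 0 := by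
        intro x hx hmem
        rw [valfinal x hx]
        split_ifs with h1 h2
        · norm_num
        · norm_num
        · exfalso
          rw [← List.take_append_drop k path] at hmem
          rcases List.mem_append.mp hmem with h | h
          · exact h2 h
          · exact h1 h
      refine ⟨?_, ?_, ?_, ?_, ?_⟩
      · intro i hi
        rw [valfinal i hi]
        split_ifs with h1 h2
        · norm_num
        · norm_num
        · exact inv1 i hi
      · intro i hi hne
        by_cases hip : (i : Int) ∈ path
        · obtain ⟨m, hmL, him⟩ := (hmem_path _).mp hip
          have hieq : i = g m := Nat.cast_inj.mp him
          have hfi : pvF M i = g (m + 1) := by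
            rw [hieq]
            exact (Function.iterate_succ_apply' (pvF M) m s).symm
          refine hnz (pvF M i) (pvF_lt M hPre i hi) ?_
          by_cases hm1 : m + 1 < L
          · rw [hfi]
            exact (hmem_path _).mpr ⟨m + 1, hm1, rfl⟩
          · have hm1L : m + 1 = L := by omega
            rw [hfi, hm1L]
            exact (hmem_path _).mpr ⟨k, hkL, by rw [hgk]⟩
        · obtain ⟨hA, hB⟩ := hnotpath i hip
          have hst_i : pvVal st i ≠ 0 := by
            rw [valfinal i hi, if_neg hA, if_neg hB] at hne
            exact hne
          have h2 := inv2 i hi hst_i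
          have hfip : ((pvF M i : ℕ) : Int) ∉ path := by
            intro hmem
            obtain ⟨m, hmL, him⟩ := (hmem_path _).mp hmem
            exact h2 (Nat.cast_inj.mp him ▸ hpath0 m hmL)
          obtain ⟨hA', hB'⟩ := hnotpath _ hfip
          rw [valfinal _ (pvF_lt M hPre i hi), if_neg hA', if_neg hB']
          exact h2
      · intro i hi h3
        rw [valfinal i hi] at h3
        split_ifs at h3 with h1 h2
        · obtain ⟨m, hkm, hmL, him⟩ := (mem_drop _).mp h1
          have hieq : i = g m := Nat.cast_inj.mp him
          refine ⟨c, hcpos, ?_⟩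
          rw [hieq]
          have hadd : (pvF M)^[c] (g m) = g (c + m) := (Function.iterate_add_apply (pvF M) c m s).symm
          rw [hadd, Nat.add_comm c m]
          exact shift' m hkm
        · exact absurd h3 (by decide)
        · exact inv3 i hi h3
      · intro i hi h2m
        rw [valfinal i hi] at h2m
        split_ifs at h2m with h1 h2
        · exact absurd h2m (by decide)
        · obtain ⟨m, hmk, him⟩ := (mem_take _).mp h2
          have hieq : i = g m := Nat.cast_inj.mp him
          rintro ⟨cc, hccpos, hfix⟩
          have hgm : g (m + cc) = g m := by
            rw [hieq] at hfix
            have hadd : (pvF M)^[cc] (g m) = g (cc + m) := (Function.iterate_add_apply (pvF M) cc m s).symm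
            rw [hadd, Nat.add_comm cc m] at hfix
            exact hfix
          by_cases hmcc : m + cc < L
          · have := ginj _ _ hmcc (by omega : m < L) hgm
            omega
          · obtain ⟨t', ht'k, ht'L, hgt⟩ := reduce (m + cc) (by omega)
            have hgt' : g t' = g m := by rw [← hgt, hgm]
            have := ginj _ _ ht'L (by omega : m < L) hgt'
            omega
        · exact inv4 i hi h2m
      · intro i hi his
        rcases Nat.lt_or_ge i s with h | h
        · have hstne := inv5 i hi h
          have hip : (i : Int) ∉ path := by
            intro hp
            obtain ⟨m, hmL, him⟩ := (hmem_path _).mp hp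
            exact hstne (Nat.cast_inj.mp him ▸ hpath0 m hmL)
          obtain ⟨hA, hB⟩ := hnotpath i hip
          rw [valfinal i hi, if_neg hA, if_neg hB]
          exact hstne
        · have : i = s := by omega
          subst this
          exact hnz i hi hsmem
    · -- the walk ran into an already finished region: mark the whole path 2
      have hjrnot : jr ∉ path := by
        intro hmem
        have h1 := (hval _ hjn).1 (by rw [hjr] at hmem; exact hmem)
        apply hb
        rw [hjr]
        exact beq_iff_eq.mpr h1
      have hjdone : pvVal st (g L) ≠ 0 := by
        have hvv := (hval _ hjn).2 (by rw [hjr] at hjrnot; exact hjrnot)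
        rw [← hvv]
        exact hstop'
      have hrun : processStart M st (s : Int) = path.foldl (fun d v => d.insert v 2) st1 := by
        unfold processStart
        rw [if_neg (by rw [hcond]; exact Bool.false_ne_true)]
        rw [← hw]
        dsimp only
        rw [← hst1, ← hjrdef, ← hpath]
        rw [if_neg hb]
      have valfinal : ∀ i : ℕ, i < M.length →
          pvVal (processStart M st (s : Int)) i =
            if (i : Int) ∈ path then 2 else pvVal st i := by
        intro i hi
        rw [hrun, markVal]
        split_ifs with h1
        · rfl
        · exact (hval i hi).2 h1
      have orbdone : ∀ t, pvVal st ((pvF M)^[t] (g L)) ≠ 0 := by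
        intro t
        induction t with
        | zero => simpa using hjdone
        | succ t ih =>
          rw [Function.iterate_succ_apply']
          exact inv2 _ (orbit_lt M hPre (g L) hjn t) ih
      refine ⟨?_, ?_, ?_, ?_, ?_⟩
      · intro i hi
        rw [valfinal i hi]
        split_ifs with h1
        · norm_num
        · exact inv1 i hi
      · intro i hi hne
        by_cases hip : (i : Int) ∈ path
        · obtain ⟨m, hmL, him⟩ := (hmem_path _).mp hip
          have hieq : i = g m := Nat.cast_inj.mp him
          have hfi : pvF M i = g (m + 1) := by
            rw [hieq]
            exact (Function.iterate_succ_apply' (pvF M) m s).symm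
          by_cases hm1 : m + 1 < L
          · rw [valfinal _ (pvF_lt M hPre i hi),
              if_pos (by rw [hfi]; exact (hmem_path _).mpr ⟨m + 1, hm1, rfl⟩)]
            norm_num
          · have hm1L : m + 1 = L := by omega
            have hfiL : pvF M i = g L := by rw [hfi, hm1L]
            have hfin : ((pvF M i : ℕ) : Int) ∉ path := by
              rw [hfiL]
              rw [hjr] at hjrnot
              exact hjrnot
            rw [valfinal _ (pvF_lt M hPre i hi), if_neg hfin, hfiL]
            exact hjdone
        · have hst_i : pvVal st i ≠ 0 := by
            rw [valfinal i hi, if_neg hip] at hne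
            exact hne
          have h2 := inv2 i hi hst_i
          have hfip : ((pvF M i : ℕ) : Int) ∉ path := by
            intro hmem
            obtain ⟨m, hmL, him⟩ := (hmem_path _).mp hmem
            exact h2 (Nat.cast_inj.mp him ▸ hpath0 m hmL)
          rw [valfinal _ (pvF_lt M hPre i hi), if_neg hfip]
          exact h2
      · intro i hi h3
        rw [valfinal i hi] at h3
        split_ifs at h3 with h1
        · exact absurd h3 (by decide)
        · exact inv3 i hi h3
      · intro i hi h2m
        rw [valfinal i hi] at h2m
        split_ifs at h2m with h1
        · obtain ⟨m, hmL, him⟩ := (hmem_path _).mp h1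
          have hieq : i = g m := Nat.cast_inj.mp him
          rintro ⟨cc, hccpos, hfix⟩
          have hgm : g (m + cc) = g m := by
            rw [hieq] at hfix
            have hadd : (pvF M)^[cc] (g m) = g (cc + m) := (Function.iterate_add_apply (pvF M) cc m s).symm
            rw [hadd, Nat.add_comm cc m] at hfix
            exact hfix
          by_cases hmcc : m + cc < L
          · have := ginj _ _ hmcc hmL hgm
            omega
          · have hsplit : g (m + cc) = (pvF M)^[m + cc - L] (g L) := by
              show (pvF M)^[m + cc] s = (pvF M)^[m + cc - L] ((pvF M)^[L] s)
              conv_lhs => rw [show m + cc = (m + cc - L) + L by omega]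
              exact Function.iterate_add_apply (pvF M) (m + cc - L) L s
            have hdone := orbdone (m + cc - L)
            rw [← hsplit, hgm] at hdone
            exact hdone (hpath0 m hmL)
        · exact inv4 i hi h2m
      · intro i hi his
        rcases Nat.lt_or_ge i s with h | h
        · have hstne := inv5 i hi h
          have hip : (i : Int) ∉ path := by
            intro hp
            obtain ⟨m, hmL, him⟩ := (hmem_path _).mp hp
            exact hstne (Nat.cast_inj.mp him ▸ hpath0 m hmL)
          rw [valfinal i hi, if_neg hip]
          exact hstne
        · have : i = s := by omega
          subst this
          rw [valfinal i hi, if_pos hsmem]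
          norm_num


theorem B_char (M : List Int) (hPre : Pre_max_perm M) :
    (max_perm_alt M).Sublist (PySem.List.pyRange 0 (M.length : Int) 1) ∧
    (∀ x, x ∈ max_perm_alt M ↔ ∃ i : ℕ, i < M.length ∧ x = (i : Int) ∧ pvPer M i) := by
  set R := PySem.List.pyRange 0 (M.length : Int) 1 with hR
  set st0 : PySem.Dict Int Int := R.foldl (fun d i => d.insert i (0 : Int)) PySem.Dict.empty with hst0
  set stf := R.foldl (processStart M) st0 with hstf
  have hrw : max_perm_alt M = PySem.Set.ofList (R.filter (fun i => stf.getD i 0 == 3)) := rfl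
  have st0val : ∀ i : ℕ, pvVal st0 i = 0 := by
    intro i
    rw [hst0, markVal]
    split_ifs
    · rfl
    · simp [pvVal, PySem.Dict.getD_empty]
  have hInv0 : OutInv M st0 0 := by
    refine ⟨fun i _ => Or.inl (st0val i), fun i _ h => absurd (st0val i) h, ?_, ?_, ?_⟩
    · intro i _ h3
      rw [st0val i] at h3
      exact absurd h3 (by decide)
    · intro i _ h2
      rw [st0val i] at h2
      exact absurd h2 (by decide)
    · intro i _ h
      exact absurd h (Nat.not_lt_zero i)
  have outer : ∀ t : ℕ, t ≤ M.length →
      OutInv M ((PySem.List.pyRange 0 (t : Int) 1).foldl (processStart M) st0) t := by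
    intro t
    induction t with
    | zero =>
      intro _
      rw [PySem.List.pyRange_one_eq_nil (by norm_num)]
      exact hInv0
    | succ t ih =>
      intro ht
      have h1 : ((t + 1 : ℕ) : Int) = (t : Int) + 1 := by push_cast; ring
      rw [h1, PySem.List.pyRange_one_succ_right (by positivity), List.foldl_append]
      simp only [List.foldl_cons, List.foldl_nil]
      exact process_spec M hPre _ t (by omega) (ih (by omega))
  have hfin : OutInv M stf M.length := by
    rw [hstf, hR]
    exact outer M.length le_rfl
  obtain ⟨c1, c2, c3, c4, c5⟩ := hfin
  have hfnd : (R.filter (fun i => stf.getD i 0 == 3)).Nodup :=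
    List.Nodup.filter _ (PySem.List.nodup_pyRange_one 0 (M.length : Int))
  constructor
  · rw [hrw, PySem.Set.ofList_eq_self_of_nodup _ hfnd]
    exact List.filter_sublist
  · intro x
    rw [hrw, PySem.Set.ofList_eq_self_of_nodup _ hfnd]
    constructor
    · intro hx
      obtain ⟨hxR, hp⟩ := List.mem_filter.mp hx
      have hx0 : 0 ≤ x ∧ x < (M.length : Int) := by
        rw [hR] at hxR
        exact PySem.List.mem_pyRange_one.mp hxR
      refine ⟨x.toNat, by omega, by omega, ?_⟩
      have h3 : pvVal stf x.toNat = 3 := by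
        unfold pvVal
        rw [show ((x.toNat : ℕ) : Int) = x by omega]
        exact beq_iff_eq.mp hp
      exact c3 _ (by omega) h3
    · rintro ⟨i, hi, rfl, hper⟩
      have h3 : pvVal stf i = 3 := by
        rcases c1 i hi with h | h | h
        · exact absurd h (c5 i hi hi)
        · exact absurd hper (c4 i hi h)
        · exact h
      refine List.mem_filter.mpr ⟨?_, ?_⟩
      · rw [hR]
        exact PySem.List.mem_pyRange_one.mpr ⟨by positivity, by exact_mod_cast hi⟩
      · exact beq_iff_eq.mpr h3

-- ===== VERDICT (by name: the statement is the Claim_ definition above) =====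
theorem max_perm_spec : Claim_equal_max_perm := by
  intro M _hDom hPre
  unfold Spec_max_perm
  obtain ⟨hA1, hA2⟩ := A_char M hPre
  obtain ⟨hB1, hB2⟩ := B_char M hPre
  exact sublist_eq_of_mem_iff hA1 hB1 (PySem.List.nodup_pyRange_one 0 (M.length : Int))
    (fun x => (hA2 x).trans (hB2 x).symm)
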